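-- pv_equiv track=rewrite | github.com/RiadSaidur/leetcode | problems/divine-contest/D - Scariest String.py | find_scariest_costumes
-- ===== SOURCE A (Python) =====
-- def is_scary(subseq):
--   n = len(subseq)
--   if n % 2 != 0:
--     return False
--
--   half = n // 2
--
--   if subseq[:half] != subseq[half:]:
--     return False
--
--   return True
--
-- def find_scariest_costumes(costumes):
--   max_scary = []
--
--   for i in range(len(costumes)):
--     for j in range(i+2, len(costumes)+1, 2):
--       subseq = costumes[i:j]
--
--       if is_scary(subseq) and subseq > max_scary:
--         max_scary = subseq
--
--   return list(max_scary)
-- ===== SOURCE B (Python) =====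
-- def find_scariest_costumes(costumes):
--     # Different algorithm: for each half-length h, scan right-to-left keeping r = run length of
--     # positions t >= i with costumes[t] == costumes[t+h]; i starts a square of
--     # half-length h iff r >= h, an O(1) test instead of an O(h) slice comparison.
--     n = len(costumes)
--     best = []
--     for h in range(1, n // 2 + 1):
--         r = 0
--         for i in range(n - h - 1, -1, -1):
--             r = r + 1 if costumes[i] == costumes[i + h] else 0
--             if r >= h:
--                 cand = costumes[i:i + 2 * h]
--                 if cand > best:
--                     best = cand
--     return best
-- ===== Notes on version B (the rewrite author's own statement) =====
-- stated objective: alternative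
-- what changed: instead of slicing every even-length substring and comparing its halves, B scans once per half-length h from right to left maintaining the run length of positions with costumes[i] == costumes[i+h], making each square test O(1); slices are built only for actual squares
import Mathlib
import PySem

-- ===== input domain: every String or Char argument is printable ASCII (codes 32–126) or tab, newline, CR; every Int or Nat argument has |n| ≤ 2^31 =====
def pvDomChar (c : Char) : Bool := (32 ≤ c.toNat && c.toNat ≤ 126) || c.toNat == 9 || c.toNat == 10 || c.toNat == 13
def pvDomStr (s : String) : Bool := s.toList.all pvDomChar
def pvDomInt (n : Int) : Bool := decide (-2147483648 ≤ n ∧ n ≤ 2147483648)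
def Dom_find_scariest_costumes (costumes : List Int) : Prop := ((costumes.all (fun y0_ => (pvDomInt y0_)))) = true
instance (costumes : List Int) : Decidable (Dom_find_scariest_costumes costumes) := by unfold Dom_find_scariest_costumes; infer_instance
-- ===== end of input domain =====

-- B replaces A's per-substring slice-equality test by one right-to-left match-run scan
-- per half-length h, an O(1) square test per position (objective: alternative algorithm).

-- Python's '>' / '<' on lists of ints (lexicographic); ported by hand, exact for List Int.
def pyListLt : List Int → List Int → Bool
  | [], [] => false
  | [], _ :: _ => true
  | _ :: _, [] => false
  | x :: xs, y :: ys => if x < y then true else if y < x then false else pyListLt xs ys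

-- ===== PORT A =====
def is_scary (subseq : List Int) : Bool :=
  let n : Int := subseq.length
  if PySem.Int.mod n 2 ≠ 0 then false
  else
    let half := PySem.Int.floordiv n 2
    if PySem.List.slice subseq none (some half) ≠ PySem.List.slice subseq (some half) none then false
    else true

def find_scariest_costumes (costumes : List Int) : List Int :=
  (PySem.List.pyRange 0 (costumes.length : Int) 1).foldl (fun max_scary i =>
    (PySem.List.pyRange (i + 2) ((costumes.length : Int) + 1) 2).foldl (fun max_scary j =>
      let subseq := PySem.List.slice costumes (some i) (some j)
      if is_scary subseq && pyListLt max_scary subseq then subseq else max_scary)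
      max_scary) []

-- ===== PORT B =====
-- (indices i and i+h are always in range inside the loop, so pyGetD's default is never read)
def find_scariest_costumes_alt (costumes : List Int) : List Int :=
  let n : Int := costumes.length
  (PySem.List.pyRange 1 (PySem.Int.floordiv n 2 + 1) 1).foldl (fun best h =>
    ((PySem.List.pyRange (n - h - 1) (-1) (-1)).foldl (fun (s : Int × List Int) i =>
      let r : Int := if PySem.List.pyGetD costumes i 0 = PySem.List.pyGetD costumes (i + h) 0 then s.1 + 1 else 0
      let best' :=
        if h ≤ r then
          let cand := PySem.List.slice costumes (some i) (some (i + 2 * h))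
          if pyListLt s.2 cand then cand else s.2
        else s.2
      (r, best')) ((0 : Int), best)).2) []

-- ===== PRECONDITION & SPEC =====
def Spec_find_scariest_costumes (costumes : List Int) (out : List Int) : Prop := out = find_scariest_costumes_alt costumes
instance (costumes : List Int) (out : List Int) : Decidable (Spec_find_scariest_costumes costumes out) := by unfold Spec_find_scariest_costumes; infer_instance

-- ===== CLAIM (what is proved, stated in full; the proofs are below) =====
def Claim_equal_find_scariest_costumes : Prop := ∀ (costumes : List Int), Dom_find_scariest_costumes costumes → Spec_find_scariest_costumes costumes (find_scariest_costumes costumes)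

-- ===== LEMMAS AND PROOFS =====

-- ---- the lexicographic order: basic facts ----
theorem pyListLt_nil_right (a : List Int) : pyListLt a [] = false := by
  cases a <;> simp [pyListLt]

theorem pyListLt_irrefl (a : List Int) : pyListLt a a = false := by
  induction a with
  | nil => simp [pyListLt]
  | cons x xs ih => simp [pyListLt, ih]

theorem pyListLt_total (a b : List Int) (h : a ≠ b) :
    pyListLt a b = true ∨ pyListLt b a = true := by
  induction a generalizing b with
  | nil =>
    cases b with
    | nil => exact absurd rfl h
    | cons y ys => left; simp [pyListLt]
  | cons x xs ih =>
    cases b with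
    | nil => right; simp [pyListLt]
    | cons y ys =>
      by_cases hxy : x = y
      · subst hxy
        have hne : xs ≠ ys := fun hh => h (by rw [hh])
        rcases ih ys hne with h' | h'
        · left; simp [pyListLt, h']
        · right; simp [pyListLt, h']
      · rcases lt_or_gt_of_ne hxy with hlt | hgt
        · left; simp [pyListLt, hlt]
        · right; simp [pyListLt, hgt]

theorem pyListLt_trans {a b c : List Int} (h1 : pyListLt a b = true) (h2 : pyListLt b c = true) :
    pyListLt a c = true := by
  induction a generalizing b c with
  | nil =>
    cases b with
    | nil => simp [pyListLt] at h1
    | cons y ys => cases c with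
      | nil => simp [pyListLt] at h2
      | cons z zs => simp [pyListLt]
  | cons x xs ih =>
    cases b with
    | nil => simp [pyListLt] at h1
    | cons y ys =>
      cases c with
      | nil => simp [pyListLt] at h2
      | cons z zs =>
        simp only [pyListLt] at h1 h2 ⊢
        have H1 : x < y ∨ (x = y ∧ pyListLt xs ys = true) := by
          by_cases hα : x < y
          · exact Or.inl hα
          · by_cases hβ : y < x
            · simp [hα, hβ] at h1
            · simp [hα, hβ] at h1; exact Or.inr ⟨by omega, h1⟩
        have H2 : y < z ∨ (y = z ∧ pyListLt ys zs = true) := by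
          by_cases hα : y < z
          · exact Or.inl hα
          · by_cases hβ : z < y
            · simp [hα, hβ] at h2
            · simp [hα, hβ] at h2; exact Or.inr ⟨by omega, h2⟩
        split_ifs with hxz hzx
        · rfl
        · rcases H1 with h1' | ⟨rfl, h1'⟩ <;> rcases H2 with h2' | ⟨rfl, h2'⟩ <;> omega
        · have hxzeq : x = z := by
            rcases H1 with h1' | ⟨rfl, h1'⟩ <;> rcases H2 with h2' | ⟨rfl, h2'⟩ <;> omega
          rcases H1 with h1' | ⟨rfl, h1'⟩
          · rcases H2 with h2' | ⟨rfl, h2'⟩ <;> omega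
          · rcases H2 with h2' | ⟨rfl, h2'⟩
            · omega
            · exact ih h1' h2'

theorem pyListLt_asymm {a b : List Int} (h : pyListLt a b = true) : pyListLt b a = false := by
  by_contra hc
  rw [Bool.not_eq_false] at hc
  have := pyListLt_trans h hc
  rw [pyListLt_irrefl] at this
  exact Bool.false_ne_true this

theorem pyListLt_false_trans {a b c : List Int} (h1 : pyListLt a b = false)
    (h2 : pyListLt b c = false) : pyListLt a c = false := by
  by_contra hc
  rw [Bool.not_eq_false] at hc
  by_cases hab : a = b
  · subst hab; rw [hc] at h2; simp at h2
  · rcases pyListLt_total a b hab with h' | h'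
    · rw [h'] at h1; simp at h1
    · have := pyListLt_trans h' hc
      rw [this] at h2; simp at h2

-- ---- the running maximum ----
def maxStep (m c : List Int) : List Int := if pyListLt m c then c else m

theorem maxStep_cases (m c : List Int) : (maxStep m c = c ∧ pyListLt m c = true) ∨ (maxStep m c = m ∧ pyListLt m c = false) := by
  by_cases h : pyListLt m c = true
  · exact Or.inl ⟨by unfold maxStep; simp [h], h⟩
  · have h' : pyListLt m c = false := by simpa using h
    exact Or.inr ⟨by unfold maxStep; simp [h'], h'⟩

theorem foldMax_spec (C : List (List Int)) (m0 : List Int) :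
    (C.foldl maxStep m0 = m0 ∨ C.foldl maxStep m0 ∈ C) ∧
    (∀ x ∈ C, pyListLt (C.foldl maxStep m0) x = false) ∧
    pyListLt (C.foldl maxStep m0) m0 = false := by
  induction C generalizing m0 with
  | nil => exact ⟨Or.inl rfl, by simp, pyListLt_irrefl m0⟩
  | cons c C ih =>
    obtain ⟨hmem, hub, hm'⟩ := ih (maxStep m0 c)
    simp only [List.foldl_cons]
    rcases maxStep_cases m0 c with ⟨heq, hlt⟩ | ⟨heq, hlt⟩ <;> rw [heq] at hmem hub hm' ⊢
    · refine ⟨?_, ?_, ?_⟩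
      · rcases hmem with h | h
        · right; rw [h]; exact List.mem_cons_self
        · right; exact List.mem_cons_of_mem _ h
      · intro x hx
        rcases List.mem_cons.mp hx with rfl | hx
        · exact hm'
        · exact hub x hx
      · exact pyListLt_false_trans hm' (pyListLt_asymm hlt)
    · refine ⟨?_, ?_, ?_⟩
      · rcases hmem with h | h
        · left; exact h
        · right; exact List.mem_cons_of_mem _ h
      · intro x hx
        rcases List.mem_cons.mp hx with rfl | hx
        · exact pyListLt_false_trans hm' hlt
        · exact hub x hx
      · exact hm'

theorem foldMax_eq_of_mem_iff (C1 C2 : List (List Int))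
    (h : ∀ x, x ∈ C1 ↔ x ∈ C2) :
    C1.foldl maxStep [] = C2.foldl maxStep [] := by
  obtain ⟨hm1, hu1, -⟩ := foldMax_spec C1 []
  obtain ⟨hm2, hu2, -⟩ := foldMax_spec C2 []
  set R1 := C1.foldl maxStep []
  set R2 := C2.foldl maxStep []
  by_contra hne
  rcases pyListLt_total R1 R2 hne with hlt | hlt
  · rcases hm2 with h2 | h2
    · rw [h2] at hlt; rw [pyListLt_nil_right] at hlt; exact Bool.false_ne_true hlt
    · have := hu1 R2 ((h R2).mpr h2); rw [this] at hlt; exact Bool.false_ne_true hlt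
  · rcases hm1 with h1 | h1
    · rw [h1] at hlt; rw [pyListLt_nil_right] at hlt; exact Bool.false_ne_true hlt
    · have := hu2 R1 ((h R1).mp h1); rw [this] at hlt; exact Bool.false_ne_true hlt

-- a guarded max-update loop is a running max over the filtered, mapped candidates
theorem foldl_guard {α : Type} (p : α → Bool) (v : α → List Int) (L : List α) (m0 : List Int) :
    L.foldl (fun m x => if p x && pyListLt m (v x) then v x else m) m0
      = ((L.filter p).map v).foldl maxStep m0 := by
  induction L generalizing m0 with
  | nil => rfl
  | cons x L ih =>
    by_cases hp : p x = true
    · simp only [List.foldl_cons, List.filter_cons, hp, Bool.true_and, List.foldl_cons, ih]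
      rfl
    · have hp' : p x = false := by simpa using hp
      simp only [List.foldl_cons, List.filter_cons, hp', Bool.false_and, Bool.false_eq_true,
        if_false, ih]

theorem foldl_flatMap_foldl {α β γ : Type} (f : γ → β → γ) (L : List α) (g : α → List β) (m0 : γ) :
    L.foldl (fun m i => (g i).foldl f m) m0 = (L.flatMap g).foldl f m0 := by
  induction L generalizing m0 with
  | nil => rfl
  | cons x L ih => simp [List.flatMap_cons, List.foldl_append, ih]

-- ---- the square-substring predicate ----
def IsSq (costumes : List Int) (c : List Int) : Prop :=
  ∃ i h : Nat, 1 ≤ h ∧ i + 2 * h ≤ costumes.length ∧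
    (costumes.drop i).take h = (costumes.drop (i + h)).take h ∧
    c = (costumes.drop i).take (2 * h)

-- is_scary on a list of length exactly 2*h
theorem is_scary_eq (c : List Int) (h : Nat) (hlen : c.length = 2 * h) :
    is_scary c = decide (c.take h = c.drop h) := by
  unfold is_scary
  rw [hlen]
  have hmod : PySem.Int.mod ((2 * h : Nat) : Int) 2 = 0 := by
    have := PySem.Int.mod_natCast (2 * h) 2
    rw [show (2 * h) % 2 = 0 from by omega] at this
    simpa using this
  have hdiv : PySem.Int.floordiv ((2 * h : Nat) : Int) 2 = (h : Int) := by
    have := PySem.Int.floordiv_natCast (2 * h) 2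
    rw [show (2 * h) / 2 = h from by omega] at this
    simpa using this
  simp only [hmod, hdiv, ne_eq, not_true_eq_false, if_false, ite_not,
    PySem.List.slice_to_natCast, PySem.List.slice_from_natCast]
  by_cases he : c.take h = c.drop h
  · simp [he]
  · simp [he]

theorem take_half (costumes : List Int) (a h : Nat) :
    ((costumes.drop a).take (2 * h)).take h = (costumes.drop a).take h := by
  rw [List.take_take]; congr 1; omega

theorem drop_half (costumes : List Int) (a h : Nat) :
    ((costumes.drop a).take (2 * h)).drop h = (costumes.drop (a + h)).take h := by
  rw [List.drop_take, List.drop_drop]; congr 2 <;> omega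

theorem is_scary_slice (costumes : List Int) (a h : Nat)
    (hlen : a + 2 * h ≤ costumes.length) :
    is_scary ((costumes.drop a).take (2 * h)) =
      decide ((costumes.drop a).take h = (costumes.drop (a + h)).take h) := by
  rw [is_scary_eq _ h (by simp [List.length_take, List.length_drop]; omega),
    take_half, drop_half]

-- A's result is the running max over its candidate list
def CA (costumes : List Int) : List (List Int) :=
  (PySem.List.pyRange 0 (costumes.length : Int) 1).flatMap (fun i =>
    ((PySem.List.pyRange (i + 2) ((costumes.length : Int) + 1) 2).filter
        (fun j => is_scary (PySem.List.slice costumes (some i) (some j)))).map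
      (fun j => PySem.List.slice costumes (some i) (some j)))

theorem A_eq_foldMax (costumes : List Int) :
    find_scariest_costumes costumes = (CA costumes).foldl maxStep [] := by
  unfold find_scariest_costumes CA
  rw [← foldl_flatMap_foldl]
  apply PySem.List.foldl_congr_mem
  intro m i _
  exact foldl_guard _ _ _ m

theorem mem_CA_iff (costumes : List Int) (x : List Int) :
    x ∈ CA costumes ↔ IsSq costumes x := by
  unfold CA IsSq
  rw [List.mem_flatMap]
  constructor
  · rintro ⟨iI, hiI, hx⟩
    rw [List.mem_map] at hx
    obtain ⟨jI, hjI, rfl⟩ := hx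
    rw [List.mem_filter] at hjI
    obtain ⟨hjr, hsc⟩ := hjI
    rw [PySem.List.mem_pyRange_one] at hiI
    rw [PySem.List.mem_pyRange_iff_of_pos (by norm_num)] at hjr
    obtain ⟨hj1, hj2, hj3⟩ := hjr
    obtain ⟨a, rfl⟩ : ∃ a : Nat, iI = (a : Int) := ⟨iI.toNat, by omega⟩
    obtain ⟨t, ht⟩ := hj3
    obtain ⟨h, ht2⟩ : ∃ h : Nat, t + 1 = (h : Int) := ⟨(t + 1).toNat, by omega⟩
    have hjval : jI = (a : Int) + ((2 * h : Nat) : Int) := by push_cast; omega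
    rw [hjval, PySem.List.slice_natCast_add] at hsc ⊢
    have hh : 1 ≤ h := by omega
    have hlen : a + 2 * h ≤ costumes.length := by omega
    rw [is_scary_slice costumes a h hlen] at hsc
    exact ⟨a, h, hh, hlen, of_decide_eq_true hsc, rfl⟩
  · rintro ⟨a, h, hh, hlen, heq, rfl⟩
    refine ⟨(a : Int), ?_, ?_⟩
    · rw [PySem.List.mem_pyRange_one]; exact ⟨by positivity, by omega⟩
    · rw [List.mem_map]
      refine ⟨(a : Int) + ((2 * h : Nat) : Int), ?_, ?_⟩
      · rw [List.mem_filter]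
        constructor
        · rw [PySem.List.mem_pyRange_iff_of_pos (by norm_num)]
          refine ⟨by push_cast; omega, by push_cast; omega, ⟨(h : Int) - 1, by push_cast; ring⟩⟩
        · rw [PySem.List.slice_natCast_add, is_scary_slice costumes a h hlen]
          exact decide_eq_true heq
      · rw [PySem.List.slice_natCast_add]

-- ---- B's side ----
def matchRun : List Int → List Int → Nat
  | x :: xs, y :: ys => if x = y then matchRun xs ys + 1 else 0
  | _, _ => 0

theorem matchRun_nil_right (xs : List Int) : matchRun xs [] = 0 := by
  cases xs <;> rfl

theorem le_matchRun_iff (h : Nat) (xs ys : List Int) :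
    h ≤ matchRun xs ys ↔ xs.take h = ys.take h ∧ h ≤ xs.length ∧ h ≤ ys.length := by
  induction h generalizing xs ys with
  | zero => simp
  | succ h ih =>
    cases xs with
    | nil => simp [matchRun]
    | cons x xs =>
      cases ys with
      | nil => simp [matchRun]
      | cons y ys =>
        by_cases hxy : x = y
        · subst hxy
          have hm : matchRun (x :: xs) (x :: ys) = matchRun xs ys + 1 := by simp [matchRun]
          rw [hm]
          constructor
          · intro hle
            obtain ⟨he, h1, h2⟩ := (ih xs ys).mp (by omega)
            exact ⟨by simp [List.take_succ_cons, he], by simp; omega, by simp; omega⟩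
          · rintro ⟨he, h1, h2⟩
            simp only [List.take_succ_cons, List.cons.injEq] at he
            simp only [List.length_cons] at h1 h2
            have := (ih xs ys).mpr ⟨he.2, by omega, by omega⟩
            omega
        · have hm : matchRun (x :: xs) (y :: ys) = 0 := by simp [matchRun, hxy]
          rw [hm]
          simp only [List.take_succ_cons, List.cons.injEq, List.length_cons]
          constructor
          · omega
          · rintro ⟨⟨h1, _⟩, _⟩; exact absurd h1 hxy

-- B's candidate list for half-length h, positions below k, scanned right to left
def CandsB (costumes : List Int) (h : Nat) : Nat → List (List Int)
  | 0 => []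
  | k + 1 =>
    (if h ≤ matchRun (costumes.drop k) (costumes.drop (k + h)) then
        [(costumes.drop k).take (2 * h)]
      else []) ++ CandsB costumes h k

theorem mem_CandsB_iff (costumes : List Int) (h k : Nat) (x : List Int) :
    x ∈ CandsB costumes h k ↔
      ∃ i : Nat, i < k ∧ h ≤ matchRun (costumes.drop i) (costumes.drop (i + h)) ∧
        x = (costumes.drop i).take (2 * h) := by
  induction k with
  | zero => simp [CandsB]
  | succ k ih =>
    simp only [CandsB, List.mem_append, ih]
    constructor
    · rintro (hx | ⟨i, hi, hr, rfl⟩)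
      · split_ifs at hx with hr
        · simp only [List.mem_singleton] at hx
          exact ⟨k, by omega, hr, hx⟩
        · simp at hx
      · exact ⟨i, by omega, hr, rfl⟩
    · rintro ⟨i, hi, hr, rfl⟩
      by_cases hik : i = k
      · subst hik; left; simp [hr]
      · right; exact ⟨i, by omega, hr, rfl⟩

-- the inner scan of B, characterised
theorem innerB (costumes : List Int) (h : Nat) (hh : 1 ≤ h) :
    ∀ (k : Nat) (b : List Int), k + h ≤ costumes.length →
      (PySem.List.pyRange ((k : Int) - 1) (-1) (-1)).foldl
          (fun (s : Int × List Int) i =>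
            (if PySem.List.pyGetD costumes i 0 = PySem.List.pyGetD costumes (i + (h : Int)) 0 then s.1 + 1 else 0,
             if (h : Int) ≤ (if PySem.List.pyGetD costumes i 0 = PySem.List.pyGetD costumes (i + (h : Int)) 0 then s.1 + 1 else 0) then
               if pyListLt s.2 (PySem.List.slice costumes (some i) (some (i + 2 * (h : Int)))) = true then
                 PySem.List.slice costumes (some i) (some (i + 2 * (h : Int)))
               else s.2
             else s.2))
          ((matchRun (costumes.drop k) (costumes.drop (k + h)) : Int), b)
        = ((matchRun costumes (costumes.drop h) : Int), (CandsB costumes h k).foldl maxStep b) := by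
  intro k
  induction k with
  | zero =>
    intro b hk
    rw [show ((0 : Nat) : Int) - 1 = (-1 : Int) from by norm_num]
    rw [PySem.List.pyRange_neg_one_eq_nil le_rfl]
    simp [CandsB]
  | succ k ih =>
    intro b hk
    have hkl : k < costumes.length := by omega
    have hkh : k + h < costumes.length := by omega
    rw [show ((k + 1 : Nat) : Int) - 1 = ((k : Nat) : Int) from by push_cast; ring]
    rw [PySem.List.pyRange_neg_one_cons (by omega : (-1 : Int) < ((k : Nat) : Int))]
    rw [List.foldl_cons]
    have hg1 : PySem.List.pyGetD costumes ((k : Nat) : Int) 0 = costumes[k] := by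
      rw [PySem.List.pyGetD_eq_getElem costumes 0 (by omega) (by exact_mod_cast hkl)]
      simp only [Int.toNat_natCast]
    have hg2 : PySem.List.pyGetD costumes (((k : Nat) : Int) + ((h : Nat) : Int)) 0 = costumes[k + h]'hkh := by
      rw [show ((k : Nat) : Int) + ((h : Nat) : Int) = ((k + h : Nat) : Int) from by push_cast; ring]
      rw [PySem.List.pyGetD_eq_getElem costumes 0 (by omega) (by exact_mod_cast hkh)]
      simp only [Int.toNat_natCast]
    have hr : matchRun (costumes.drop k) (costumes.drop (k + h)) =
        if costumes[k] = costumes[k + h]'hkh then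
          matchRun (costumes.drop (k + 1)) (costumes.drop (k + 1 + h)) + 1
        else 0 := by
      rw [List.drop_eq_getElem_cons hkl, List.drop_eq_getElem_cons hkh,
        show k + h + 1 = k + 1 + h from by omega]
      rfl
    have hcand : PySem.List.slice costumes (some ((k : Nat) : Int))
        (some (((k : Nat) : Int) + 2 * ((h : Nat) : Int))) = (costumes.drop k).take (2 * h) := by
      rw [show ((k : Nat) : Int) + 2 * ((h : Nat) : Int) = ((k : Nat) : Int) + ((2 * h : Nat) : Int) from by
        push_cast; ring]
      exact PySem.List.slice_natCast_add costumes k (2 * h)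
    have hstate : (if PySem.List.pyGetD costumes ((k : Nat) : Int) 0 =
          PySem.List.pyGetD costumes (((k : Nat) : Int) + ((h : Nat) : Int)) 0 then
          ((matchRun (costumes.drop (k + 1)) (costumes.drop (k + 1 + h)) : Nat) : Int) + 1 else 0)
        = ((matchRun (costumes.drop k) (costumes.drop (k + h)) : Nat) : Int) := by
      rw [hg1, hg2, hr]
      by_cases hc : costumes[k] = costumes[k + h]'hkh
      · simp [hc]
      · simp [hc]
    dsimp only
    rw [show (k + 1) + h = k + 1 + h from rfl] at *
    rw [hstate, hcand]
    rw [ih _ (by omega)]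
    have hsplit : (CandsB costumes h (k + 1)).foldl maxStep b
        = (CandsB costumes h k).foldl maxStep
            (if ((h : Nat) : Int) ≤ ((matchRun (costumes.drop k) (costumes.drop (k + h)) : Nat) : Int) then
              if pyListLt b ((costumes.drop k).take (2 * h)) = true then (costumes.drop k).take (2 * h) else b
            else b) := by
      show ((if h ≤ matchRun (costumes.drop k) (costumes.drop (k + h)) then
          [(costumes.drop k).take (2 * h)] else []) ++ CandsB costumes h k).foldl maxStep b = _
      rw [List.foldl_append]
      congr 1
      by_cases hc : h ≤ matchRun (costumes.drop k) (costumes.drop (k + h))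
      · rw [if_pos hc, if_pos (by exact_mod_cast hc)]
        simp [maxStep]
      · rw [if_neg hc, if_neg (by exact_mod_cast hc)]
        rfl
    rw [hsplit]

theorem mem_CB_iff (costumes : List Int) (x : List Int) :
    x ∈ (PySem.List.pyRange 1 (((costumes.length / 2 : Nat) : Int) + 1) 1).flatMap
        (fun hI => CandsB costumes hI.toNat (costumes.length - hI.toNat)) ↔ IsSq costumes x := by
  rw [List.mem_flatMap]
  unfold IsSq
  constructor
  · rintro ⟨hI, hmem, hx⟩
    rw [PySem.List.mem_pyRange_one] at hmem
    obtain ⟨h, rfl⟩ : ∃ h : Nat, hI = (h : Int) := ⟨hI.toNat, by omega⟩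
    simp only [Int.toNat_natCast] at hx
    rw [mem_CandsB_iff] at hx
    obtain ⟨i, hik, hr, rfl⟩ := hx
    rw [le_matchRun_iff] at hr
    obtain ⟨heq, h1, h2⟩ := hr
    simp only [List.length_drop] at h1 h2
    refine ⟨i, h, by omega, by omega, heq, rfl⟩
  · rintro ⟨i, h, hh, hlen, heq, rfl⟩
    have hh2 : h ≤ costumes.length / 2 := by omega
    refine ⟨(h : Int), ?_, ?_⟩
    · rw [PySem.List.mem_pyRange_one]
      exact ⟨by omega, by omega⟩
    · simp only [Int.toNat_natCast]
      rw [mem_CandsB_iff]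
      refine ⟨i, by omega, ?_, rfl⟩
      rw [le_matchRun_iff]
      exact ⟨heq, by simp only [List.length_drop]; omega, by simp only [List.length_drop]; omega⟩

theorem B_eq_foldMax (costumes : List Int) :
    find_scariest_costumes_alt costumes
      = (((PySem.List.pyRange 1 (((costumes.length / 2 : Nat) : Int) + 1) 1).flatMap
            (fun hI => CandsB costumes hI.toNat (costumes.length - hI.toNat))).foldl maxStep []) := by
  unfold find_scariest_costumes_alt
  rw [← foldl_flatMap_foldl]
  have hfd : PySem.Int.floordiv ((costumes.length : Nat) : Int) 2 = ((costumes.length / 2 : Nat) : Int) := by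
    exact_mod_cast PySem.Int.floordiv_natCast costumes.length 2
  dsimp only
  rw [hfd]
  apply PySem.List.foldl_congr_mem
  intro best hI hmem
  rw [PySem.List.mem_pyRange_one] at hmem
  obtain ⟨h, rfl⟩ : ∃ h : Nat, hI = (h : Int) := ⟨hI.toNat, by omega⟩
  have hh : 1 ≤ h := by omega
  have hh2 : h ≤ costumes.length / 2 := by omega
  have hkh : (costumes.length - h) + h = costumes.length := by omega
  rw [show ((costumes.length : Nat) : Int) - ((h : Nat) : Int) - 1
      = (((costumes.length - h : Nat) : Nat) : Int) - 1 from by omega]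
  rw [show ((0 : Int), best)
      = ((((matchRun (costumes.drop (costumes.length - h))
          (costumes.drop ((costumes.length - h) + h)) : Nat) : Int)), best) from by
    rw [hkh, List.drop_length, matchRun_nil_right]; simp]
  rw [innerB costumes h hh (costumes.length - h) best (by omega)]
  simp only [Int.toNat_natCast]

theorem find_scariest_eq (costumes : List Int) :
    find_scariest_costumes costumes = find_scariest_costumes_alt costumes := by
  rw [A_eq_foldMax, B_eq_foldMax]
  apply foldMax_eq_of_mem_iff
  intro x
  rw [mem_CA_iff, mem_CB_iff]

-- ===== VERDICT (by name: the statement is the Claim_ definition above) =====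
theorem find_scariest_costumes_spec : Claim_equal_find_scariest_costumes := by
  intro costumes _
  unfold Spec_find_scariest_costumes
  exact find_scariest_eq costumes
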